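-- pv_equiv track=rewrite | github.com/vladtf/soam | backend/src/schema_inference/stream.py | _extract_ingestion_id
-- ===== SOURCE A (Python) =====
-- from typing import Optional, Dict, List, Any
--
-- def _extract_ingestion_id(file_path: str) -> Optional[str]:
--     """Extract ingestion_id from file path."""
--     try:
--         # Path format: s3a://lake/bronze/ingestion_id=<id>/date=<date>/hour=<hour>/...
--         parts = file_path.split("/")
--         for part in parts:
--             if part.startswith("ingestion_id="):
--                 return part.split("=", 1)[1]
--         return None
--     except Exception:
--         return None
-- ===== SOURCE B (Python) =====
-- from typing import Optional
--
-- def _extract_ingestion_id(file_path: str) -> Optional[str]: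
--     """Extract ingestion_id from file path (single suffix scan, no split lists)."""
--     s = file_path
--     while True:
--         if s.startswith("ingestion_id="):
--             rest = s[13:]
--             i = rest.find("/")
--             return rest if i == -1 else rest[:i]
--         i = s.find("/")
--         if i == -1:
--             return None
--         s = s[i + 1:]
-- ===== Notes on version B (the rewrite author's own statement) =====
-- stated objective: alternative
-- what changed: B replaces A's separator-split into a list of parts plus a scan over that list (and a second single-use split on the hit part) by one in-place suffix scan of the string: test the marker prefix at each segment start and jump past the next separator, slicing the id out directly, so no intermediate list of parts is ever built.
import Mathlib
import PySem

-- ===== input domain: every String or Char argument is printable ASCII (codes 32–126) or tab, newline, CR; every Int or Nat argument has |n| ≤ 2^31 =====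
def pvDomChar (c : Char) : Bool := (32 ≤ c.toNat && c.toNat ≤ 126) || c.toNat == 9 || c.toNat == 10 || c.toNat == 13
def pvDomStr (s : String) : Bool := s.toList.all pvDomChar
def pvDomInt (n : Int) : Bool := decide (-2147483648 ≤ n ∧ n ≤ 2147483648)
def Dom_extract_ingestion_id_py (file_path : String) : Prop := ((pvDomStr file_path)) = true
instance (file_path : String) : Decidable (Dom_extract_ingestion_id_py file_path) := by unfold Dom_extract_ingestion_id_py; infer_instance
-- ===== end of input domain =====

-- B replaces A's split('/')-then-scan-parts loop by a single suffix scan of the string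
-- (startswith at each segment start, jump past the next '/'), building no list of parts (objective: alternative).

-- ===== PORT A =====
-- "ingestion_id="
def pvMarker : List Char := ['i', 'n', 'g', 'e', 's', 't', 'i', 'o', 'n', '_', 'i', 'd', '=']

-- part.split("=", 1)[1]; a bare-[1] IndexError would be caught by A's `except`, which returns None
def pvASplitEq (p : List Char) : Option String :=
  match PySem.List.pyGet? (PySem.Chars.splitOnMax p ['='] 1) 1 with
  | some r => some (String.ofList r)
  | none => none

-- `for part in parts: if part.startswith("ingestion_id="): return part.split("=",1)[1]` / `return None`
def pvALoop : List (List Char) → Option String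
  | [] => none
  | p :: ps => if PySem.Chars.startswith p pvMarker then pvASplitEq p else pvALoop ps

def extract_ingestion_id_py (file_path : String) : Option String :=
  pvALoop (PySem.Chars.splitOn file_path.toList ['/'])

-- ===== PORT B =====
-- the `while True` suffix scan of Source B; the dite merely names the guard Python tests with `i == -1`
def pvAltGo (s : List Char) : Option String :=
  if PySem.Chars.startswith s pvMarker then
    -- rest = s[13:], i = rest.find("/") of Source B, written inline
    if PySem.Chars.find (PySem.List.slice s (some 13) none) ['/'] = -1 then
      some (String.ofList (PySem.List.slice s (some 13) none))
    else
      some (String.ofList (PySem.List.slice (PySem.List.slice s (some 13) none) none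
        (some (PySem.Chars.find (PySem.List.slice s (some 13) none) ['/']))))
  else
    if h : PySem.Chars.find s ['/'] = -1 then none
    else pvAltGo (PySem.List.slice s (some (PySem.Chars.find s ['/'] + 1)) none)
termination_by s.length
decreasing_by
  have h0 : (0:Int) ≤ PySem.Chars.find s ['/'] := by
    have := PySem.Chars.neg_one_le_find s ['/']
    omega
  have hne : s ≠ [] := by
    intro hnil
    subst hnil
    exact h (by decide)
  rw [PySem.List.slice_from s (by omega)]
  have hlen : 0 < s.length := List.length_pos_iff.mpr hne
  simp only [List.length_drop]
  omega

def extract_ingestion_id_py_alt (file_path : String) : Option String :=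
  pvAltGo file_path.toList

-- ===== PRECONDITION & SPEC =====
def Spec_extract_ingestion_id_py (file_path : String) (out : Option String) : Prop := out = extract_ingestion_id_py_alt file_path
instance (file_path : String) (out : Option String) : Decidable (Spec_extract_ingestion_id_py file_path out) := by unfold Spec_extract_ingestion_id_py; infer_instance

-- ===== CLAIM (what is proved, stated in full; the proofs are below) =====
def Claim_equal_extract_ingestion_id_py : Prop := ∀ (file_path : String), Dom_extract_ingestion_id_py file_path → Spec_extract_ingestion_id_py file_path (extract_ingestion_id_py file_path)

-- ===== LEMMAS AND PROOFS =====

-- structural model of s.split(c) for a one-character separator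
def pvSplit (c : Char) : List Char → List (List Char)
  | [] => [[]]
  | a :: t => if a = c then [] :: pvSplit c t else (pvSplit c t).modifyHead (a :: ·)

-- structural model of s.split(c, 1)
def pvSplitO (c : Char) : List Char → List (List Char)
  | [] => [[]]
  | a :: t => if a = c then [[], t] else (pvSplitO c t).modifyHead (a :: ·)

lemma pvSplitOn_go (c : Char) : ∀ (l : List Char) (fuel : Nat) (cur : List Char) (acc : List (List Char)),
    l.length < fuel →
    PySem.Chars.splitOn.go [c] fuel l cur acc
      = acc.reverse ++ (pvSplit c l).modifyHead (cur.reverse ++ ·) := by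
  intro l
  induction l with
  | nil =>
    intro fuel cur acc h
    match fuel, h with
    | f + 1, _ => simp [PySem.Chars.splitOn.go, pvSplit]
  | cons x rest ih =>
    intro fuel cur acc h
    match fuel, h with
    | f + 1, h =>
      simp only [List.length_cons] at h
      by_cases hx : x = c
      · subst hx
        rw [show PySem.Chars.splitOn.go [x] (f + 1) (x :: rest) cur acc
              = PySem.Chars.splitOn.go [x] f rest [] (cur.reverse :: acc) by
            simp [PySem.Chars.splitOn.go]]
        rw [ih f [] (cur.reverse :: acc) (by omega)]
        cases hsp : pvSplit x rest <;> simp [pvSplit, hsp]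
      · rw [show PySem.Chars.splitOn.go [c] (f + 1) (x :: rest) cur acc
              = PySem.Chars.splitOn.go [c] f rest (x :: cur) acc by
            simp [PySem.Chars.splitOn.go, List.isPrefixOf, Ne.symm hx]]
        rw [ih f (x :: cur) acc (by omega)]
        cases hsp : pvSplit c rest <;> simp [pvSplit, hx, hsp]

lemma pvSplitOn_eq (c : Char) (s : List Char) :
    PySem.Chars.splitOn s [c] = pvSplit c s := by
  have h := pvSplitOn_go c s (s.length + 1) [] [] (by omega)
  rw [PySem.Chars.splitOn] at *
  rw [h]
  cases hsp : pvSplit c s <;> simp [hsp]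

lemma pvGoMaxZero (c : Char) (fuel : Nat) (l cur : List Char) (acc : List (List Char)) :
    PySem.Chars.splitOnMax.go [c] fuel 0 l cur acc = acc.reverse ++ [cur.reverse ++ l] := by
  cases fuel <;> cases l <;> simp [PySem.Chars.splitOnMax.go]

lemma pvSplitOnMax_go (c : Char) : ∀ (l : List Char) (fuel : Nat) (cur : List Char) (acc : List (List Char)),
    l.length < fuel →
    PySem.Chars.splitOnMax.go [c] fuel 1 l cur acc
      = acc.reverse ++ (pvSplitO c l).modifyHead (cur.reverse ++ ·) := by
  intro l
  induction l with
  | nil =>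
    intro fuel cur acc h
    match fuel, h with
    | f + 1, _ => simp [PySem.Chars.splitOnMax.go, pvSplitO]
  | cons x rest ih =>
    intro fuel cur acc h
    match fuel, h with
    | f + 1, h =>
      simp only [List.length_cons] at h
      by_cases hx : x = c
      · subst hx
        rw [show PySem.Chars.splitOnMax.go [x] (f + 1) 1 (x :: rest) cur acc
              = PySem.Chars.splitOnMax.go [x] f 0 rest [] (cur.reverse :: acc) by
            simp [PySem.Chars.splitOnMax.go]]
        rw [pvGoMaxZero]
        simp [pvSplitO]
      · rw [show PySem.Chars.splitOnMax.go [c] (f + 1) 1 (x :: rest) cur acc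
              = PySem.Chars.splitOnMax.go [c] f 1 rest (x :: cur) acc by
            simp [PySem.Chars.splitOnMax.go, List.isPrefixOf, Ne.symm hx]]
        rw [ih f (x :: cur) acc (by omega)]
        cases hsp : pvSplitO c rest <;> simp [pvSplitO, hx, hsp]

lemma pvSplitOnMax_eq (c : Char) (s : List Char) :
    PySem.Chars.splitOnMax s [c] 1 = pvSplitO c s := by
  have h := pvSplitOnMax_go c s (s.length + 1) [] [] (by omega)
  rw [PySem.Chars.splitOnMax]
  norm_num
  rw [h]
  cases hsp : pvSplitO c s <;> simp [hsp]

lemma pvSplit_no (c : Char) (s : List Char) (h : ∀ x ∈ s, x ≠ c) : pvSplit c s = [s] := by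
  induction s with
  | nil => rfl
  | cons a t ih =>
    have ha : a ≠ c := h a (by simp)
    rw [pvSplit, if_neg ha, ih (fun x hx => h x (by simp [hx]))]
    rfl

lemma pvSplit_app (c : Char) (a b : List Char) (h : ∀ x ∈ a, x ≠ c) :
    pvSplit c (a ++ c :: b) = a :: pvSplit c b := by
  induction a with
  | nil => simp [pvSplit]
  | cons x t ih =>
    have hx : x ≠ c := h x (by simp)
    rw [List.cons_append, pvSplit, if_neg hx, ih (fun y hy => h y (by simp [hy]))]
    rfl

lemma pvSplitO_app (c : Char) (a b : List Char) (h : ∀ x ∈ a, x ≠ c) :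
    pvSplitO c (a ++ c :: b) = [a, b] := by
  induction a with
  | nil => simp [pvSplitO]
  | cons x t ih =>
    have hx : x ≠ c := h x (by simp)
    rw [List.cons_append, pvSplitO, if_neg hx, ih (fun y hy => h y (by simp [hy]))]
    rfl

lemma pvFind_no (s : List Char) (h : ∀ x ∈ s, x ≠ '/') : PySem.Chars.find s ['/'] = -1 := by
  rw [PySem.Chars.find_eq_neg_one_iff, List.singleton_infix_iff]
  exact fun hm => h _ hm rfl

lemma pvFind_app (a b : List Char) (h : ∀ x ∈ a, x ≠ '/') :
    PySem.Chars.find (a ++ '/' :: b) ['/'] = (a.length : Int) := by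
  have hdrop : (a ++ '/' :: b).drop a.length = '/' :: b := by
    simp
  have hocc : ['/'] <+: (a ++ '/' :: b).drop a.length := by
    rw [hdrop]; exact ⟨b, rfl⟩
  have hne : PySem.Chars.find (a ++ '/' :: b) ['/'] ≠ -1 := by
    rw [Ne, PySem.Chars.find_eq_neg_one_iff, List.singleton_infix_iff]
    simp
  have h0 : 0 ≤ PySem.Chars.find (a ++ '/' :: b) ['/'] := by
    have := PySem.Chars.neg_one_le_find (a ++ '/' :: b) ['/']
    omega
  obtain ⟨hpre, hmin⟩ := PySem.Chars.find_spec h0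
  set j := (PySem.Chars.find (a ++ '/' :: b) ['/']).toNat with hj
  have hle : j ≤ a.length := by
    by_contra hgt
    exact hmin a.length (by omega) hocc
  have hge : a.length ≤ j := by
    by_contra hcon
    have hlt : j < a.length := by omega
    obtain ⟨t, ht⟩ := hpre
    have hhead : ((a ++ '/' :: b).drop j).head? = some '/' := by
      rw [← ht]; rfl
    rw [List.head?_drop] at hhead
    have hj' : (a ++ '/' :: b)[j]? = a[j]? := List.getElem?_append_left hlt
    rw [hj', List.getElem?_eq_getElem hlt] at hhead
    have : a[j] = '/' := by simpa using hhead
    exact h a[j] (List.getElem_mem _) this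
  have : j = a.length := by omega
  omega

-- "ingestion_id" (the part of the marker before its '=')
def pvMarkerPre : List Char := ['i', 'n', 'g', 'e', 's', 't', 'i', 'o', 'n', '_', 'i', 'd']

set_option maxRecDepth 8192 in
lemma pvASplitEq_eq (p : List Char) (h : pvMarker <+: p) :
    pvASplitEq p = some (String.ofList (p.drop 13)) := by
  obtain ⟨q, rfl⟩ := h
  have h1 : pvMarker ++ q = pvMarkerPre ++ '=' :: q := rfl
  rw [pvASplitEq, pvSplitOnMax_eq, h1]
  rw [pvSplitO_app '=' pvMarkerPre q (by
    have hall : pvMarkerPre.all (fun x => x != '=') = true := by decide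
    intro x hx
    simpa using List.all_eq_true.mp hall x hx)]
  have h2 : (pvMarkerPre ++ '=' :: q).drop 13 = q := rfl
  rw [h2]
  rfl

lemma pvMarker_prefix_of_parts (a b : List Char)
    (h : pvMarker <+: a ++ '/' :: b) : pvMarker <+: a := by
  have hlen : 13 ≤ a.length := by
    by_contra hcon
    have hlt : a.length < 13 := by omega
    obtain ⟨t, ht⟩ := h
    have : ('/' : Char) ∈ pvMarker := by
      have h1 : (a ++ '/' :: b)[a.length]? = some '/' := by
        rw [List.getElem?_append_right (le_refl _)]
        simp
      have h2 : (a ++ '/' :: b)[a.length]? = pvMarker[a.length]? := by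
        rw [← ht, List.getElem?_append_left (by simp [pvMarker]; omega)]
      rw [h2, List.getElem?_eq_getElem (by simp [pvMarker]; omega)] at h1
      have : pvMarker[a.length]'(by simp [pvMarker]; omega) = '/' := by simpa using h1
      rw [← this]
      exact List.getElem_mem _
    revert this
    decide
  exact List.prefix_of_prefix_length_le h (a.prefix_append _) (by simpa [pvMarker] using hlen)

lemma pvMain : ∀ (n : Nat) (s : List Char), s.length ≤ n →
    pvALoop (pvSplit '/' s) = pvAltGo s := by
  intro n
  induction n with
  | zero =>
    intro s h
    have : s = [] := List.length_eq_zero_iff.mp (by omega)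
    subst this
    rw [pvSplit_no '/' [] (by simp)]
    rw [pvALoop, if_neg (by decide), pvALoop, pvAltGo, if_neg (by decide), dif_pos (by decide)]
  | succ n ih =>
    intro s hs
    have hdecomp := List.takeWhile_append_dropWhile (p := fun x => x != '/') (l := s)
    cases hr : s.dropWhile (fun x => x != '/') with
    | nil =>
      rw [hr, List.append_nil] at hdecomp
      have hall : ∀ x ∈ s, x ≠ '/' := by
        intro x hx
        rw [← hdecomp] at hx
        simpa using List.mem_takeWhile_imp hx
      rw [pvSplit_no _ _ hall, pvAltGo]
      by_cases hsw : PySem.Chars.startswith s pvMarker = true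
      · have hpre : pvMarker <+: s := (PySem.Chars.startswith_iff _ _).1 hsw
        rw [pvALoop, if_pos hsw, pvASplitEq_eq s hpre, if_pos hsw]
        rw [PySem.List.slice_from s (by norm_num)]
        have hfr : PySem.Chars.find (s.drop 13) ['/'] = -1 :=
          pvFind_no (s.drop 13) (fun x hx => hall x (List.mem_of_mem_drop hx))
        simp [hfr]
      · rw [pvALoop, if_neg hsw, if_neg hsw, pvALoop]
        rw [dif_pos (pvFind_no s hall)]
    | cons c0 b =>
      have hc0 : c0 = '/' := by
        have := List.head?_dropWhile_not (fun x => x != '/') s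
        rw [hr] at this
        simpa using this
      subst hc0
      set a := s.takeWhile (fun x => x != '/') with ha
      have hseq : a ++ '/' :: b = s := by rw [ha, ← hr, hdecomp]
      have hamem : ∀ x ∈ a, x ≠ '/' := by
        intro x hx
        simpa using List.mem_takeWhile_imp hx
      rw [← hseq, pvSplit_app _ _ _ hamem, pvAltGo]
      by_cases hsw : PySem.Chars.startswith (a ++ '/' :: b) pvMarker = true
      · have hpre : pvMarker <+: a ++ '/' :: b := (PySem.Chars.startswith_iff _ _).1 hsw
        have hprea : pvMarker <+: a := pvMarker_prefix_of_parts a b hpre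
        have halen : 13 ≤ a.length := by
          have := hprea.length_le
          simpa [pvMarker] using this
        have hswa : PySem.Chars.startswith a pvMarker = true :=
          (PySem.Chars.startswith_iff _ _).2 hprea
        rw [pvALoop, if_pos hswa, pvASplitEq_eq a hprea, if_pos hsw]
        rw [PySem.List.slice_from _ (by norm_num)]
        have hdrop13 : (a ++ '/' :: b).drop (13 : Int).toNat = a.drop 13 ++ '/' :: b := by
          rw [show ((13 : Int).toNat) = 13 from rfl]
          rw [List.drop_append_of_le_length halen]
        rw [hdrop13]
        have hfr : PySem.Chars.find (a.drop 13 ++ '/' :: b) ['/'] = ((a.drop 13).length : Int) :=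
          pvFind_app _ _ (fun x hx => hamem x (List.mem_of_mem_drop hx))
        rw [hfr]
        rw [if_neg (by omega)]
        rw [PySem.List.slice_to _ (by omega)]
        rw [show (((a.drop 13).length : Int)).toNat = (a.drop 13).length from by omega]
        rw [List.take_left]
      · have hswa : PySem.Chars.startswith a pvMarker = false := by
          rw [Bool.eq_false_iff]
          intro hswa'
          have hprea : pvMarker <+: a := (PySem.Chars.startswith_iff _ _).1 hswa'
          exact hsw ((PySem.Chars.startswith_iff _ _).2 (hprea.trans (a.prefix_append _)))
        rw [pvALoop, if_neg (by simp [hswa]), if_neg hsw]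
        have hfr : PySem.Chars.find (a ++ '/' :: b) ['/'] = (a.length : Int) := pvFind_app a b hamem
        rw [dif_neg (by rw [hfr]; omega)]
        rw [hfr, PySem.List.slice_from _ (by omega)]
        have hdropb : (a ++ '/' :: b).drop ((a.length : Int) + 1).toNat = b := by
          rw [show ((a.length : Int) + 1).toNat = (a ++ ['/']).length from by simp]
          rw [show a ++ '/' :: b = (a ++ ['/']) ++ b from by simp]
          exact List.drop_left
        rw [hdropb]
        have hblen : b.length ≤ n := by
          have := hs
          rw [← hseq] at this
          simp at this
          omega
        exact ih b hblen

-- ===== VERDICT (by name: the statement is the Claim_ definition above) =====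
theorem extract_ingestion_id_py_spec : Claim_equal_extract_ingestion_id_py := by
  intro file_path _
  unfold Spec_extract_ingestion_id_py extract_ingestion_id_py extract_ingestion_id_py_alt
  rw [pvSplitOn_eq]
  exact pvMain file_path.toList.length file_path.toList (le_refl _)
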